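-- pv_equiv track=rewrite | github.com/extemporaneousb/Blackdog | tests/core_audit_support.py | _is_forbidden_core_import
-- ===== SOURCE A (Python) =====
-- FORBIDDEN_CORE_IMPORT_PREFIXES = (
--     "blackdog_cli",
--     "blackdog.supervisor",
--     "blackdog.conversations",
--     "blackdog.board",
--     "blackdog.worktree",
--     "extensions",
-- )
--
-- def _is_forbidden_core_import(target: str) -> bool:
--     if target == "__future__":
--         return False
--     for prefix in FORBIDDEN_CORE_IMPORT_PREFIXES:
--         if target == prefix or target.startswith(prefix + "."):
--             return True
--     if target.startswith("blackdog.") or target.startswith("blackdog_cli."):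
--         return True
--     return False
-- ===== SOURCE B (Python) =====
-- def _is_forbidden_core_import(target: str) -> bool:
--     head, dot, _tail = target.partition(".")
--     if head in ("extensions", "blackdog_cli"):
--         return True
--     if head == "blackdog":
--         return dot == "."
--     return False
-- ===== Notes on version B (the rewrite author's own statement) =====
-- stated objective: simpler
-- what changed: B replaces A's loop over the six-prefix tuple plus two trailing startswith checks (and the future-import guard) by a single partition at the first dot and a three-way branch on the head component, using the fact that every dotted blackdog tuple entry is subsumed by the blackdog dot catch-all.
import Mathlib
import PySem

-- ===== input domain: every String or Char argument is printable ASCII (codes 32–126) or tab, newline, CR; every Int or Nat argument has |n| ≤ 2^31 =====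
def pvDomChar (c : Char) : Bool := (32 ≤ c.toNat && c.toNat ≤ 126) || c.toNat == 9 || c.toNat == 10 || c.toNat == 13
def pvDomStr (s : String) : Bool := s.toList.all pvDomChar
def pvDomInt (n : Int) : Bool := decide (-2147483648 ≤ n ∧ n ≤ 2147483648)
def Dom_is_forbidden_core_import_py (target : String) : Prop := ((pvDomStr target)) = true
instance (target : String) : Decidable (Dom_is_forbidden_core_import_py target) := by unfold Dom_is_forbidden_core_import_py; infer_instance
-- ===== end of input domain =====

-- B replaces A's loop over the prefix tuple by a single partition at the first '.' and a
-- three-way branch on the head component (objective: simpler).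

-- ===== PORT A =====
-- the module constant FORBIDDEN_CORE_IMPORT_PREFIXES, as a list of char lists
def pvPrefixesA : List (List Char) :=
  [ "blackdog_cli".toList,
    "blackdog.supervisor".toList,
    "blackdog.conversations".toList,
    "blackdog.board".toList,
    "blackdog.worktree".toList,
    "extensions".toList ]

def is_forbidden_core_import_py (target : String) : Bool :=
  let cs := target.toList
  if cs = "__future__".toList then false
  else if pvPrefixesA.any (fun p => decide (cs = p) || PySem.Chars.startswith cs (p ++ ['.'])) then true
  else if PySem.Chars.startswith cs "blackdog.".toList
          || PySem.Chars.startswith cs "blackdog_cli.".toList then true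
  else false

-- ===== PORT B =====
def is_forbidden_core_import_py_alt (target : String) : Bool :=
  -- target.partition('.') ported by hand (no PySem primitive): head = chars before the
  -- first '.', dot = that '.' when present — exact for str.partition
  let cs := target.toList
  let head := cs.takeWhile (fun c => c != '.')
  let dot := (cs.dropWhile (fun c => c != '.')).take 1
  if head = "extensions".toList ∨ head = "blackdog_cli".toList then true
  else if head = "blackdog".toList then decide (dot = ['.'])
  else false

-- ===== PRECONDITION & SPEC =====
def Spec_is_forbidden_core_import_py (target : String) (out : Bool) : Prop := out = is_forbidden_core_import_py_alt target
instance (target : String) (out : Bool) : Decidable (Spec_is_forbidden_core_import_py target out) := by unfold Spec_is_forbidden_core_import_py; infer_instance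

-- ===== CLAIM (what is proved, stated in full; the proofs are below) =====
def Claim_equal_is_forbidden_core_import_py : Prop := ∀ (target : String), Dom_is_forbidden_core_import_py target → Spec_is_forbidden_core_import_py target (is_forbidden_core_import_py target)

-- ===== LEMMAS AND PROOFS =====

-- the canonical "forbidden" condition both programs compute
def pvForbidden (cs : List Char) : Prop :=
  (cs = "extensions".toList ∨ ("extensions".toList ++ ['.']) <+: cs)
  ∨ (cs = "blackdog_cli".toList ∨ ("blackdog_cli".toList ++ ['.']) <+: cs)
  ∨ ("blackdog".toList ++ ['.']) <+: cs

-- the head of partition('.') equals a dot-free word w iff the string is w itself or starts with "w."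
theorem pv_takeWhile_eq_iff (w : List Char) (hw : ('.' : Char) ∉ w) :
    ∀ cs : List Char,
      (cs.takeWhile (fun c => c != '.') = w ↔ cs = w ∨ (w ++ ['.']) <+: cs) := by
  induction w with
  | nil =>
    intro cs
    cases cs with
    | nil => simp
    | cons c t =>
      by_cases hc : c = '.'
      · subst hc; rw [List.takeWhile_cons]; simp [List.cons_prefix_cons]
      · rw [List.takeWhile_cons, if_pos (by simp [hc] : (c != '.') = true)]
        simp only [List.nil_append, List.cons_prefix_cons]
        constructor
        · intro h; exact absurd h (by simp)
        · rintro (h | ⟨h, -⟩)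
          · exact absurd h (by simp)
          · exact absurd h.symm hc
  | cons a w' ih =>
    intro cs
    have ha : a ≠ '.' := fun h => hw (h ▸ List.mem_cons_self)
    have hw' : ('.' : Char) ∉ w' := fun h => hw (List.mem_cons_of_mem _ h)
    cases cs with
    | nil => simp
    | cons c t =>
      by_cases hc : c = '.'
      · subst hc
        rw [List.takeWhile_cons, if_neg (by simp : ¬(('.' : Char) != '.') = true)]
        constructor
        · intro h; exact absurd h (by simp)
        · rintro (h | h)
          · injection h with h1 _; exact absurd h1.symm ha
          · rw [List.cons_append, List.cons_prefix_cons] at h; exact absurd h.1 ha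
      · rw [List.takeWhile_cons, if_pos (by simp [hc] : (c != '.') = true)]
        simp only [List.cons_append, List.cons_prefix_cons, List.cons.injEq]
        rw [ih hw' t]
        constructor
        · rintro ⟨h1, h2 | h2⟩
          · exact Or.inl ⟨h1, h2⟩
          · exact Or.inr ⟨h1.symm, h2⟩
        · rintro (⟨h1, h2⟩ | ⟨h1, h2⟩)
          · exact ⟨h1, Or.inl h2⟩
          · exact ⟨h1.symm, Or.inr h2⟩

-- partition('.')'s separator component is "." iff '.' occurs in the string
theorem pv_dot_iff : ∀ cs : List Char,
    ((cs.dropWhile (fun c => c != '.')).take 1 = ['.']) ↔ ('.' : Char) ∈ cs := by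
  intro cs
  induction cs with
  | nil => simp
  | cons c t ih =>
    by_cases hc : c = '.'
    · subst hc; simp
    · rw [List.dropWhile_cons, if_pos (by simp [hc] : (c != '.') = true)]
      rw [ih, List.mem_cons]
      exact ⟨Or.inr, fun h => h.resolve_left (fun h => hc h.symm)⟩

-- "blackdog." starts the string iff the head component is "blackdog" and a '.' occurs
theorem pv_bd_iff (cs : List Char) :
    ("blackdog".toList ++ ['.']) <+: cs ↔
      (cs.takeWhile (fun c => c != '.') = "blackdog".toList ∧ ('.' : Char) ∈ cs) := by
  constructor
  · intro h
    refine ⟨(pv_takeWhile_eq_iff "blackdog".toList (by decide) cs).mpr (Or.inr h), ?_⟩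
    exact h.subset (by decide)
  · rintro ⟨hh, hd⟩
    rcases (pv_takeWhile_eq_iff "blackdog".toList (by decide) cs).mp hh with h | h
    · subst h; exact absurd hd (by decide)
    · exact h

-- A's port returns true exactly on pvForbidden
theorem pv_A_iff (cs : List Char) :
    (if cs = "__future__".toList then false
     else if pvPrefixesA.any (fun p => decide (cs = p) || PySem.Chars.startswith cs (p ++ ['.'])) then true
     else if PySem.Chars.startswith cs "blackdog.".toList
             || PySem.Chars.startswith cs "blackdog_cli.".toList then true
     else false) = true ↔ pvForbidden cs := by
  have hbds : ("blackdog".toList ++ ['.']) <+: ("blackdog.supervisor".toList ++ ['.']) := by decide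
  have hbdc : ("blackdog".toList ++ ['.']) <+: ("blackdog.conversations".toList ++ ['.']) := by decide
  have hbdb : ("blackdog".toList ++ ['.']) <+: ("blackdog.board".toList ++ ['.']) := by decide
  have hbdw : ("blackdog".toList ++ ['.']) <+: ("blackdog.worktree".toList ++ ['.']) := by decide
  have hcli : ("blackdog_cli".toList ++ ['.']) = "blackdog_cli.".toList := by decide
  have hbd : ("blackdog".toList ++ ['.']) = "blackdog.".toList := by decide
  simp only [pvPrefixesA, pvForbidden, List.any_cons, List.any_nil, PySem.Chars.startswith,
    Bool.or_false, Bool.or_eq_true, decide_eq_true_eq, List.isPrefixOf_iff_prefix]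
  split_ifs with hF hany hrest
  · -- cs = "__future__": no clause of pvForbidden holds
    subst hF
    simp only [false_iff]
    decide
  · -- some tuple clause fired
    simp only [true_iff]
    rcases hany with (h | h) | (h | h) | (h | h) | (h | h) | (h | h) | (h | h)
    · exact Or.inr (Or.inl (Or.inl h))
    · exact Or.inr (Or.inl (Or.inr h))
    · exact Or.inr (Or.inr (by rw [h]; decide))
    · exact Or.inr (Or.inr (hbds.trans h))
    · exact Or.inr (Or.inr (by rw [h]; decide))
    · exact Or.inr (Or.inr (hbdc.trans h))
    · exact Or.inr (Or.inr (by rw [h]; decide))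
    · exact Or.inr (Or.inr (hbdb.trans h))
    · exact Or.inr (Or.inr (by rw [h]; decide))
    · exact Or.inr (Or.inr (hbdw.trans h))
    · exact Or.inl (Or.inl h)
    · exact Or.inl (Or.inr h)
  · -- the trailing "blackdog." / "blackdog_cli." check fired
    simp only [true_iff]
    rcases hrest with h | h
    · exact Or.inr (Or.inr (hbd ▸ h))
    · exact Or.inr (Or.inl (Or.inr (hcli ▸ h)))
  · -- nothing fired: pvForbidden is false
    simp only [false_iff]
    rintro ((h | h) | (h | h) | h)
    · exact hany (Or.inr (Or.inr (Or.inr (Or.inr (Or.inr (Or.inl h))))))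
    · exact hany (Or.inr (Or.inr (Or.inr (Or.inr (Or.inr (Or.inr h))))))
    · exact hany (Or.inl (Or.inl h))
    · exact hrest (Or.inr (hcli ▸ h))
    · exact hrest (Or.inl (hbd ▸ h))

-- B's port returns true exactly on pvForbidden
theorem pv_B_iff (cs : List Char) :
    (if cs.takeWhile (fun c => c != '.') = "extensions".toList
        ∨ cs.takeWhile (fun c => c != '.') = "blackdog_cli".toList then true
     else if cs.takeWhile (fun c => c != '.') = "blackdog".toList then
       decide ((cs.dropWhile (fun c => c != '.')).take 1 = ['.'])
     else false) = true ↔ pvForbidden cs := by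
  have hE := pv_takeWhile_eq_iff "extensions".toList (by decide) cs
  have hC := pv_takeWhile_eq_iff "blackdog_cli".toList (by decide) cs
  have hB := pv_bd_iff cs
  simp only [pvForbidden] at *
  split_ifs with h1 h2
  · simp only [true_iff]
    rcases h1 with h | h
    · exact Or.inl (hE.mp h)
    · exact Or.inr (Or.inl (hC.mp h))
  · rw [decide_eq_true_eq, pv_dot_iff cs]
    constructor
    · intro hd; exact Or.inr (Or.inr (hB.mpr ⟨h2, hd⟩))
    · rintro ((h | h) | (h | h) | h)
      · exact absurd (hE.mpr (Or.inl h)) (by rw [h2]; decide)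
      · exact absurd (hE.mpr (Or.inr h)) (by rw [h2]; decide)
      · exact absurd (hC.mpr (Or.inl h)) (by rw [h2]; decide)
      · exact absurd (hC.mpr (Or.inr h)) (by rw [h2]; decide)
      · exact (hB.mp h).2
  · simp only [false_iff]
    rintro ((h | h) | (h | h) | h)
    · exact h1 (Or.inl (hE.mpr (Or.inl h)))
    · exact h1 (Or.inl (hE.mpr (Or.inr h)))
    · exact h1 (Or.inr (hC.mpr (Or.inl h)))
    · exact h1 (Or.inr (hC.mpr (Or.inr h)))
    · exact h2 (hB.mp h).1

-- ===== VERDICT (by name: the statement is the Claim_ definition above) =====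
theorem is_forbidden_core_import_py_spec : Claim_equal_is_forbidden_core_import_py := by
  intro target _
  unfold Spec_is_forbidden_core_import_py is_forbidden_core_import_py is_forbidden_core_import_py_alt
  generalize target.toList = cs
  rw [Bool.eq_iff_iff]
  exact (pv_A_iff cs).trans (pv_B_iff cs).symm
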